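-- pv_equiv track=rewrite | github.com/harshal-509/Leetcode-Problems | 2562-find-the-array-concatenation-value/2562-find-the-array-concatenation-value.py | findTheArrayConcVal
-- ===== SOURCE A (Python) =====
-- from typing import List
--
-- def findTheArrayConcVal(nums: List[int]) -> int:
--     n=len(nums)
--     i=0
--     j=n-1
--     ans=0
--     while(i<j):
--         x=int(str(nums[i])+str(nums[j]))
--         ans+=x
--         i+=1
--         j-=1
--     if(i==j):
--         ans+=nums[i]
--     return ans
-- ===== SOURCE B (Python) =====
-- from typing import List
--
-- def findTheArrayConcVal(nums: List[int]) -> int: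
--     if not nums:
--         return 0
--     if len(nums) == 1:
--         return nums[0]
--     return int(str(nums[0]) + str(nums[-1])) + findTheArrayConcVal(nums[1:-1])
-- ===== Notes on version B (the rewrite author's own statement) =====
-- stated objective: alternative
-- what changed: Replaces the two-pointer index loop with an accumulator by direct structural recursion that peels the outer pair (first and last element) each call and recurses on the slice nums[1:-1], with base cases for the empty list and a singleton; no indices or accumulator are threaded.
import Mathlib
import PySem

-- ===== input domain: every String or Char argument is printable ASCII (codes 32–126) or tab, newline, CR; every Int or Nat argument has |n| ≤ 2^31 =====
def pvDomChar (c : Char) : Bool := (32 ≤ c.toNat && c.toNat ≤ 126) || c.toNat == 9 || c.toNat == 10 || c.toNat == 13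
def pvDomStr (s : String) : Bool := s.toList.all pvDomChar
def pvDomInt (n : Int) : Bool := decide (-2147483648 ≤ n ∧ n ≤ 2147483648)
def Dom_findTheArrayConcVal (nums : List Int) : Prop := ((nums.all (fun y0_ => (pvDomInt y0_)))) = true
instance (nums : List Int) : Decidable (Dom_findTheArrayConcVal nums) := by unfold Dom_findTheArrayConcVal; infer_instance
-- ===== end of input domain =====

-- B replaces A's two-pointer index loop by direct structural recursion peeling the outer pair
-- (nums[0], nums[-1]) and recursing on nums[1:-1]; return-value equivalence on Pre_ (where Python's int() succeeds).

-- ===== PORT A =====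
-- the while loop of A; pyGetD defaults are never hit (0 ≤ i < j < len inside the loop),
-- and `.getD 0` on int(...) is only reachable outside Pre_ (where Python raises ValueError)
def findTheArrayConcValLoop (nums : List Int) (i j ans : Int) : Int :=
  if i < j then
    findTheArrayConcValLoop nums (i + 1) (j - 1)
      (ans + (PySem.Int.ofStr? (PySem.Int.toStr (PySem.List.pyGetD nums i 0) ++
                                PySem.Int.toStr (PySem.List.pyGetD nums j 0))).getD 0)
  else if i = j then ans + PySem.List.pyGetD nums i 0
  else ans
termination_by (j - i).toNat
decreasing_by omega

def findTheArrayConcVal (nums : List Int) : Int :=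
  findTheArrayConcValLoop nums 0 ((nums.length : Int) - 1) 0

-- ===== PORT B =====
-- recursion of Source B: [] -> 0, [x] -> x, else concat of nums[0],nums[-1] plus recursion on nums[1:-1];
-- `.getD 0` on int(...) is only reachable outside Pre_ (where Python raises ValueError)
def findTheArrayConcVal_alt (nums : List Int) : Int :=
  if nums.length = 0 then 0
  else if nums.length = 1 then PySem.List.pyGetD nums 0 0
  else
    (PySem.Int.ofStr? (PySem.Int.toStr (PySem.List.pyGetD nums 0 0) ++
                       PySem.Int.toStr (PySem.List.pyGetD nums (-1) 0))).getD 0 +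
    findTheArrayConcVal_alt (PySem.List.slice nums (some 1) (some (-1)))
termination_by nums.length
decreasing_by
  rename_i h0 h1
  have := PySem.List.length_slice nums (1 : Int) (-1)
  simp at this
  omega

-- ===== PRECONDITION & SPEC =====
-- Pre_ excludes exactly the inputs on which Python A raises ValueError: a negative number
-- in the right half (the second member of some concatenated pair), where int(str(a)+str(b)) fails.
def Pre_findTheArrayConcVal (nums : List Int) : Prop :=
  ∀ x ∈ nums.drop ((nums.length + 1) / 2), 0 ≤ x
instance (nums : List Int) : Decidable (Pre_findTheArrayConcVal nums) := by
  unfold Pre_findTheArrayConcVal; infer_instance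

def pvWitness_findTheArrayConcVal : List Int := [7, -2, 11, 5]

def Spec_findTheArrayConcVal (nums : List Int) (out : Int) : Prop := out = findTheArrayConcVal_alt nums
instance (nums : List Int) (out : Int) : Decidable (Spec_findTheArrayConcVal nums out) := by
  unfold Spec_findTheArrayConcVal; infer_instance

-- ===== CLAIM (what is proved, stated in full; the proofs are below) =====
def Claim_equal_findTheArrayConcVal : Prop := ∀ (nums : List Int), Dom_findTheArrayConcVal nums → Pre_findTheArrayConcVal nums → Spec_findTheArrayConcVal nums (findTheArrayConcVal nums)

-- ===== LEMMAS AND PROOFS =====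

theorem slice_mid (l : List Int) (h : 2 ≤ l.length) :
    PySem.List.slice l (some 1) (some (-1)) = l.tail.dropLast := by
  simp [PySem.List.slice]
  rw [Nat.min_eq_left (by omega), List.drop_one]
  rw [show l.length - 1 - 1 = l.tail.length - 1 by simp]
  rw [← List.dropLast_eq_take]

theorem alt_nil : findTheArrayConcVal_alt [] = 0 := by
  rw [findTheArrayConcVal_alt]; simp

theorem alt_singleton (x : Int) : findTheArrayConcVal_alt [x] = x := by
  rw [findTheArrayConcVal_alt]; simp

theorem alt_cons_append (a b : Int) (mid : List Int) :
    findTheArrayConcVal_alt (a :: (mid ++ [b])) =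
      (PySem.Int.ofStr? (PySem.Int.toStr a ++ PySem.Int.toStr b)).getD 0 +
      findTheArrayConcVal_alt mid := by
  rw [findTheArrayConcVal_alt]
  rw [if_neg (by simp), if_neg (by simp)]
  rw [slice_mid _ (by simp)]
  rw [show (a :: (mid ++ [b])).tail.dropLast = mid by simp]
  rw [show a :: (mid ++ [b]) = (a :: mid) ++ [b] from rfl,
      PySem.List.pyGetD_neg_one_append_singleton]
  simp [PySem.List.pyGetD_zero_cons]

theorem loop_eq (s : List Int) : ∀ (nums : List Int) (i : Nat) (ans : Int),
    (nums.drop i).take s.length = s → i + s.length ≤ nums.length →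
    findTheArrayConcValLoop nums (i : Int) ((i : Int) + (s.length : Int) - 1) ans
      = ans + findTheArrayConcVal_alt s := by
  induction s using List.bidirectionalRec with
  | nil =>
    intro nums i ans h hlen
    rw [findTheArrayConcValLoop]
    rw [if_neg (by simp), if_neg (by simp; omega)]
    simp [alt_nil]
  | singleton x =>
    intro nums i ans h hlen
    have hx : nums[i]? = some x := by
      cases hd : nums.drop i with
      | nil => rw [hd] at h; simp at h
      | cons y t =>
        rw [hd] at h; simp at h
        have h0 : (nums.drop i)[0]? = some x := by rw [hd]; simp [h]
        simpa [List.getElem?_drop] using h0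
    rw [findTheArrayConcValLoop]
    rw [if_neg (by simp), if_pos (by simp)]
    rw [alt_singleton, PySem.List.pyGetD_natCast]
    simp [List.getD, hx]
  | cons_append a mid b ih =>
    intro nums i ans h hlen
    have hL : (a :: (mid ++ [b])).length = mid.length + 2 := by simp
    rw [hL] at h hlen ⊢
    have ha : nums[i]? = some a := by
      have h0 : ((nums.drop i).take (mid.length + 2))[0]? = some a := by rw [h]; simp
      rw [List.getElem?_take_of_lt (by omega)] at h0
      simpa [List.getElem?_drop] using h0
    have hb : nums[i + mid.length + 1]? = some b := by
      have h0 : ((nums.drop i).take (mid.length + 2))[mid.length + 1]? = some b := by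
        rw [h, show a :: (mid ++ [b]) = (a :: mid) ++ [b] from rfl,
            show mid.length + 1 = (a :: mid).length by simp]
        simp
      rw [List.getElem?_take_of_lt (by omega)] at h0
      rw [List.getElem?_drop] at h0
      rw [show i + (mid.length + 1) = i + mid.length + 1 by omega] at h0
      exact h0
    have hmid : (nums.drop (i + 1)).take mid.length = mid := by
      have hdd : nums.drop (i+1) = (nums.drop i).drop 1 := by rw [List.drop_drop, Nat.add_comm]
      rw [hdd, List.take_drop]
      have h3 : List.take (1 + mid.length) (List.drop i nums)
          = List.take (1 + mid.length) (List.take (mid.length + 2) (List.drop i nums)) := by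
        rw [List.take_take]; congr 1; omega
      rw [h3, h, show 1 + mid.length = mid.length + 1 by omega, List.take_succ_cons,
          List.take_left]
      simp
    rw [findTheArrayConcValLoop]
    rw [if_pos (by push_cast; omega)]
    rw [show ((i:Int) + 1) = ((i + 1 : Nat) : Int) by push_cast; ring,
        show ((i:Int) + (↑(mid.length + 2) : Int) - 1 - 1) = ((i + 1 : Nat) : Int) + (mid.length : Int) - 1 by push_cast; ring]
    rw [ih nums (i+1) _ hmid (by omega)]
    rw [alt_cons_append]
    have ga : PySem.List.pyGetD nums ((i : Int)) 0 = a := by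
      rw [PySem.List.pyGetD_natCast]; simp [List.getD, ha]
    have gb : PySem.List.pyGetD nums ((i:Int) + (↑(mid.length + 2) : Int) - 1) 0 = b := by
      rw [show ((i:Int) + (↑(mid.length + 2):Int) - 1) = ((i + mid.length + 1 : Nat) : Int) by push_cast; ring]
      rw [PySem.List.pyGetD_natCast]; simp [List.getD, hb]
    rw [ga, gb]; ring

theorem main_eq (nums : List Int) : findTheArrayConcVal nums = findTheArrayConcVal_alt nums := by
  cases h : nums with
  | nil => simp [findTheArrayConcVal, findTheArrayConcValLoop, alt_nil]
  | cons x xs =>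
    have hl := loop_eq (x :: xs) (x :: xs) 0 0 (by simp) (by simp)
    rw [findTheArrayConcVal]
    simpa using hl

-- ===== VERDICT (by name: the statement is the Claim_ definition above) =====
theorem findTheArrayConcVal_spec : Claim_equal_findTheArrayConcVal := by
  intro nums _ _
  unfold Spec_findTheArrayConcVal
  exact main_eq nums
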